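-- pv_equiv track=rewrite | github.com/tomhea/project-euler | p21-30.py | dig_cyc
-- ===== SOURCE A (Python) =====
-- def dig_cyc(num, search_to):
--     i, n = 0, 1
--     nums = []
--
--     while i < search_to:
--         nums += [n % num]
--         n *= 10
--         for j in range(i):
--             if nums[i] == nums[j]:
--                 return i - j
--         i += 1
--
--     return search_to
-- ===== SOURCE B (Python) =====
-- def dig_cyc(num, search_to):
--     # Floyd's tortoise-and-hare cycle detection on x -> (10*x) % num:
--     # no list of remainders is stored; finds tail length mu and period lam directly.
--     # Phase 1 is capped by search_to: if tortoise and hare have not met by step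
--     # search_to, the first repeat lies at index >= search_to and the answer is search_to.
--     if search_to <= 0:
--         return search_to
--     def step(x):
--         return (10 * x) % num
--     x0 = 1 % num
--     # Phase 1: find a meeting point inside the cycle
--     t = 1
--     tort = step(x0)
--     hare = step(step(x0))
--     while tort != hare:
--         if t >= search_to:
--             return search_to
--         tort = step(tort)
--         hare = step(step(hare))
--         t += 1
--     # Phase 2: tail length mu
--     mu = 0
--     tort = x0
--     while tort != hare:
--         tort = step(tort)
--         hare = step(hare)
--         mu += 1
--     # Phase 3: cycle length lam
--     lam = 1
--     hare = step(tort)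
--     while tort != hare:
--         hare = step(hare)
--         lam += 1
--     return lam if mu + lam < search_to else search_to
-- ===== Notes on version B (the rewrite author's own statement) =====
-- stated objective: faster
-- what changed: A stores every remainder 10^i % num in a list and rescans all previous entries to find the first repeat; B stores nothing: it runs Floyd's tortoise-and-hare cycle detection on x -> (10*x) % num to find the tail length mu and period lam of the orbit, and returns lam (A's first repeat distance) capped by search_to.
import Mathlib
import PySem

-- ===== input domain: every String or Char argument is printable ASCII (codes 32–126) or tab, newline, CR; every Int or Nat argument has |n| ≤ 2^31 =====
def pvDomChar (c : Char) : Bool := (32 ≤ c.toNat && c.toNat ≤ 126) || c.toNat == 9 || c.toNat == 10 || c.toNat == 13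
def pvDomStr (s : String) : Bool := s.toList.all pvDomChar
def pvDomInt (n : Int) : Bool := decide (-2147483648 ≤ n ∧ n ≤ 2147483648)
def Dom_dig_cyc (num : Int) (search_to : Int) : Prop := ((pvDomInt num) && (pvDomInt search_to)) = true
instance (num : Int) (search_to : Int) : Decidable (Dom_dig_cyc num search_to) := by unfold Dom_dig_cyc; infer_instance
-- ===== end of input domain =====

-- B replaces A's stored remainder list and quadratic rescans by Floyd's tortoise-and-hare
-- cycle detection on x -> (10*x) % num, computing the tail length and period with O(1) memory.


-- ===== PORT A =====
-- inner 'for j in range(i): if nums[i] == nums[j]: return i - j'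
def digCycInner (nums : List Int) (i : Int) : Option Int :=
  (PySem.List.pyRange 0 i 1).findSome? (fun j =>
    if PySem.List.pyGetD nums i 0 = PySem.List.pyGetD nums j 0 then some (i - j) else none)

-- 'while i < search_to' loop of A, carrying (i, n, nums)
def digCycLoop (num search_to i n : Int) (nums : List Int) : Int :=
  if _h : i < search_to then
    let nums' := nums ++ [PySem.Int.mod n num]
    match digCycInner nums' i with
    | some r => r
    | none => digCycLoop num search_to (i + 1) (n * 10) nums'
  else search_to
termination_by (search_to - i).toNat
decreasing_by omega

def dig_cyc (num : Int) (search_to : Int) : Int :=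
  digCycLoop num search_to 0 1 []

-- ===== PORT B =====
-- step(x) = (10*x) % num
def pvStep (num x : Int) : Int := PySem.Int.mod (10 * x) num

-- Phase 1 'while tort != hare' with the search_to cap (none = 'return search_to');
-- fuel only makes the loop total; under Pre_ it never runs out
def pvFloyd1 (num search_to : Int) : Nat → Int → Int → Int → Option Int
  | 0, _, _, h => some h
  | f + 1, t, tort, hare =>
    if tort = hare then some hare
    else if search_to ≤ t then none
    else pvFloyd1 num search_to f (t + 1) (pvStep num tort) (pvStep num (pvStep num hare))

-- Phase 2: tail length mu (returns (mu, tort))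
def pvFloyd2 (num : Int) : Nat → Int → Int → Int → Int × Int
  | 0, t, _, mu => (mu, t)
  | f + 1, t, h, mu => if t = h then (mu, t) else pvFloyd2 num f (pvStep num t) (pvStep num h) (mu + 1)

-- Phase 3: cycle length lam
def pvFloyd3 (num : Int) : Nat → Int → Int → Int → Int
  | 0, _, _, lam => lam
  | f + 1, t, h, lam => if t = h then lam else pvFloyd3 num f t (pvStep num h) (lam + 1)

-- phases 2 and 3, entered once the hare has met the tortoise
def pvFloydRest (num search_to meet : Int) : Int :=
  let x0 := PySem.Int.mod 1 num
  let fuel := num.natAbs + 1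
  let p := pvFloyd2 num fuel x0 meet 0
  let lam := pvFloyd3 num fuel p.2 (pvStep num p.2) 1
  if p.1 + lam < search_to then lam else search_to

def pvFloydMain (num search_to : Int) : Int :=
  let x0 := PySem.Int.mod 1 num
  match pvFloyd1 num search_to (num.natAbs + 1) 1 (pvStep num x0) (pvStep num (pvStep num x0)) with
  | none => search_to
  | some meet => pvFloydRest num search_to meet

def dig_cyc_alt (num : Int) (search_to : Int) : Int :=
  if search_to ≤ 0 then search_to else pvFloydMain num search_to

-- ===== PRECONDITION & SPEC =====
-- Pre_ excludes exactly the inputs where A raises ZeroDivisionError (num = 0 with at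
-- least one loop iteration); B raises there too.
def Pre_dig_cyc (num : Int) (search_to : Int) : Prop := num ≠ 0 ∨ search_to ≤ 0
instance (num : Int) (search_to : Int) : Decidable (Pre_dig_cyc num search_to) := by unfold Pre_dig_cyc; infer_instance
def pvWitness_dig_cyc : Int × Int := (7, 10)
def Spec_dig_cyc (num : Int) (search_to : Int) (out : Int) : Prop := out = dig_cyc_alt num search_to
instance (num : Int) (search_to : Int) (out : Int) : Decidable (Spec_dig_cyc num search_to out) := by unfold Spec_dig_cyc; infer_instance

-- ===== CLAIM (what is proved, stated in full; the proofs are below) =====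
def Claim_equal_dig_cyc : Prop := ∀ (num : Int) (search_to : Int), Dom_dig_cyc num search_to → Pre_dig_cyc num search_to → Spec_dig_cyc num search_to (dig_cyc num search_to)

-- ===== LEMMAS AND PROOFS =====

-- the abstract orbit s i = 10^i % num both programs walk
def pvS (num : Int) : Nat → Int
  | 0 => PySem.Int.mod 1 num
  | n + 1 => pvStep num (pvS num n)

-- mod is unchanged by adding a multiple of the divisor
lemma pv_mod_mul_add (b c a : Int) : PySem.Int.mod (b * c + a) b = PySem.Int.mod a b := by
  simp [PySem.Int.mod]

lemma pv_step_mod (num n x : Int)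
    (h : PySem.Int.mod x num = PySem.Int.mod n num) :
    PySem.Int.mod (PySem.Int.mod x num * 10) num = PySem.Int.mod (n * 10) num := by
  rw [h]
  have h1 : PySem.Int.mod n num * 10 = num * (-(PySem.Int.floordiv n num * 10)) + n * 10 := by
    have := PySem.Int.floordiv_mul_add_mod n num
    ring_nf
    ring_nf at this
    linarith
  rw [h1, pv_mod_mul_add]

lemma pv_mod10 (num n : Int) :
    pvStep num (PySem.Int.mod n num) = PySem.Int.mod (n * 10) num := by
  show PySem.Int.mod (10 * PySem.Int.mod n num) num = _
  rw [mul_comm (10 : Int)]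
  exact pv_step_mod num n n rfl

-- findSome? congruence on the elements actually scanned
lemma pv_findSome_congr {a b : Type} (l : List a) (f g : a → Option b)
    (h : ∀ x ∈ l, f x = g x) : l.findSome? f = l.findSome? g := by
  induction l with
  | nil => rfl
  | cons x t ih =>
    rw [List.findSome?_cons, List.findSome?_cons, h x (by simp)]
    cases g x with
    | some _ => rfl
    | none => exact ih (fun y hy => h y (by simp [hy]))

-- a first-match scan over range(len l) is idxOf?
lemma pv_findSome_range (l : List Int) (r : Int) (g : Nat → Int) :
    (List.range l.length).findSome? (fun k => if r = l.getD k 0 then some (g k) else none)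
      = (l.idxOf? r).map g := by
  induction l generalizing g with
  | nil => simp
  | cons a t ih =>
    rw [List.length_cons, List.range_succ_eq_map, List.findSome?_cons]
    by_cases h : r = a
    · simp [h, List.idxOf?_cons]
    · rw [List.idxOf?_cons]
      simp only [List.getD_cons_zero, if_neg h, List.findSome?_map]
      have : ((fun k => if r = (a :: t).getD k 0 then some (g k) else none) ∘ (· + 1))
           = (fun k => if r = t.getD k 0 then some (g (k + 1)) else none) := by
        funext k; simp
      rw [this, ih (fun k => g (k + 1))]
      rw [if_neg (by simpa using Ne.symm h), Option.map_map]
      rfl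

-- A's inner scan over nums ++ [r] finds exactly the first index of r in nums
lemma pv_inner_eq_idxOf (nums : List Int) (r : Int) :
    digCycInner (nums ++ [r]) (nums.length : Int) =
      (nums.idxOf? r).map (fun k : Nat => (nums.length : Int) - (k : Int)) := by
  unfold digCycInner
  rw [PySem.List.pyRange_zero_natCast]
  rw [List.findSome?_map]
  have hcongr : ((fun j => if PySem.List.pyGetD (nums ++ [r]) (nums.length : Int) 0 = PySem.List.pyGetD (nums ++ [r]) j 0 then some ((nums.length : Int) - j) else none) ∘ (fun k : Nat => (k : Int)))
      = fun k : Nat => if PySem.List.pyGetD (nums ++ [r]) (nums.length : Int) 0 = PySem.List.pyGetD (nums ++ [r]) (k : Int) 0 then some ((nums.length : Int) - (k : Int)) else none := rfl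
  rw [hcongr]
  have hmid : PySem.List.pyGetD (nums ++ [r]) (nums.length : Int) 0 = r := by
    rw [PySem.List.pyGetD_natCast, List.getD_append_right nums [r] 0 nums.length le_rfl]
    simp
  rw [pv_findSome_congr (List.range nums.length) _
    (fun k => if r = nums.getD k 0 then some ((nums.length : Int) - (k : Int)) else none)
    (by
      intro k hk
      rw [List.mem_range] at hk
      rw [hmid, PySem.List.pyGetD_natCast, List.getD_append nums [r] 0 k hk])]
  exact pv_findSome_range nums r (fun k => (nums.length : Int) - (k : Int))

-- idxOf? through appending one element
lemma pv_idxOf?_append (l : List Int) (x v : Int) :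
    (l ++ [x]).idxOf? v = (l.idxOf? v).or (([x].idxOf? v).map (· + l.length)) :=
  List.findIdx?_append

-- first index of (s N) in map s (range N) is its first earlier match J
lemma pv_idxOf_first (s : Nat → Int) (r : Int) :
    ∀ (N J : Nat), J < N → s J = r → (∀ j, j < J → s j ≠ r) →
      ((List.range N).map s).idxOf? r = some J := by
  intro N
  induction N with
  | zero => intro J h; omega
  | succ N ih =>
    intro J hJN hSJ hfirst
    rw [List.range_succ, List.map_append, List.map_cons, List.map_nil, pv_idxOf?_append]
    by_cases h : J < N
    · rw [ih J h hSJ hfirst]; rfl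
    · have hJ : J = N := by omega
      subst hJ
      have hnone : ((List.range J).map s).idxOf? r = none := by
        rw [List.idxOf?_eq_none_iff]
        intro hmem
        obtain ⟨j, hj, hjr⟩ := by simpa using hmem
        exact hfirst j hj hjr
      rw [hnone]
      simp [List.idxOf?_cons, hSJ]

-- the values of the orbit are mods, so they all have |value| < |num|
lemma pv_mod_natAbs_lt (num a : Int) (hnum : num ≠ 0) :
    (PySem.Int.mod a num).natAbs < num.natAbs := by
  rcases lt_or_gt_of_ne hnum with h | h
  · have := PySem.Int.mod_neg_bounds a h
    omega
  · have h1 := PySem.Int.mod_nonneg a h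
    have h2 := PySem.Int.mod_lt a h
    omega

lemma pvS_is_mod (num : Int) (n : Nat) : ∃ c, pvS num n = PySem.Int.mod c num := by
  cases n with
  | zero => exact ⟨1, rfl⟩
  | succ m => exact ⟨10 * pvS num m, rfl⟩

lemma pvS_natAbs_lt (num : Int) (n : Nat) (hnum : num ≠ 0) :
    (pvS num n).natAbs < num.natAbs := by
  obtain ⟨c, hc⟩ := pvS_is_mod num n
  rw [hc]; exact pv_mod_natAbs_lt num c hnum

-- same |value| forces the same value: both mods carry the divisor's sign
lemma pvS_eq_of_natAbs_eq (num : Int) (m n : Nat) (hnum : num ≠ 0)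
    (h : (pvS num m).natAbs = (pvS num n).natAbs) : pvS num m = pvS num n := by
  obtain ⟨c, hc⟩ := pvS_is_mod num m
  obtain ⟨d, hd⟩ := pvS_is_mod num n
  rw [hc, hd] at h ⊢
  rcases lt_or_gt_of_ne hnum with hlt | hlt
  · have h1 := PySem.Int.mod_neg_bounds c hlt
    have h2 := PySem.Int.mod_neg_bounds d hlt
    omega
  · have h1 := PySem.Int.mod_nonneg c hlt
    have h2 := PySem.Int.mod_nonneg d hlt
    omega

-- pigeonhole: the orbit collides within |num| + 1 steps
lemma pv_pigeon (num : Int) (hnum : num ≠ 0) :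
    ∃ n, n ≤ num.natAbs ∧ ∃ j, j < n ∧ pvS num j = pvS num n := by
  have hcard : Fintype.card (Fin num.natAbs) < Fintype.card (Fin (num.natAbs + 1)) := by
    simp
  obtain ⟨a, b, hab, hfab⟩ := Fintype.exists_ne_map_eq_of_card_lt
    (fun i : Fin (num.natAbs + 1) => (⟨(pvS num i.1).natAbs, pvS_natAbs_lt num i.1 hnum⟩ : Fin num.natAbs)) hcard
  have heq : pvS num a.1 = pvS num b.1 :=
    pvS_eq_of_natAbs_eq num a.1 b.1 hnum (by simpa using congrArg Fin.val hfab)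
  rcases Nat.lt_trichotomy a.1 b.1 with h | h | h
  · exact ⟨b.1, by omega, a.1, h, heq⟩
  · exact absurd (Fin.ext h) hab
  · exact ⟨a.1, by omega, b.1, h, heq.symm⟩

-- ===== A-side characterisation =====
lemma pvA_loop (num search_to : Int) (N J : Nat)
    (hJN : J < N) (hSJ : pvS num J = pvS num N)
    (hinj : ∀ a b : Nat, a < b → b < N → pvS num a ≠ pvS num b)
    (hJfirst : ∀ j : Nat, j < J → pvS num j ≠ pvS num N) :
    ∀ (fuel i : Nat) (n : Int),
      (search_to - (i : Int)).toNat ≤ fuel → i ≤ N →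
      PySem.Int.mod n num = pvS num i →
      digCycLoop num search_to (i : Int) n ((List.range i).map (pvS num)) =
        if (N : Int) < search_to then (N : Int) - (J : Int) else search_to := by
  intro fuel
  induction fuel with
  | zero =>
    intro i n hfuel hiN hmod
    rw [digCycLoop, dif_neg (by omega)]
    have : (i : Int) ≤ (N : Int) := by exact_mod_cast hiN
    rw [if_neg (by omega)]
  | succ fuel ih =>
    intro i n hfuel hiN hmod
    rw [digCycLoop]
    by_cases h : (i : Int) < search_to
    · rw [dif_pos h]
      have hlen : ((List.range i).map (pvS num)).length = i := by simp
      have hinner : digCycInner ((List.range i).map (pvS num) ++ [PySem.Int.mod n num]) (i : Int)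
          = (((List.range i).map (pvS num)).idxOf? (pvS num i)).map
              (fun k : Nat => (i : Int) - (k : Int)) := by
        rw [hmod]
        have := pv_inner_eq_idxOf ((List.range i).map (pvS num)) (pvS num i)
        rw [hlen] at this
        exact this
      rcases Nat.lt_or_ge i N with hiN' | hiN'
      · -- no earlier match yet: the scan misses and the loop goes on
        have hnone : ((List.range i).map (pvS num)).idxOf? (pvS num i) = none := by
          rw [List.idxOf?_eq_none_iff]
          intro hmem
          obtain ⟨j, hj, hjr⟩ := by simpa using hmem
          exact hinj j i hj hiN' hjr
        simp only [hinner, hnone, Option.map_none]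
        have hrec := ih (i + 1) (n * 10) (by omega) (by omega)
          (by rw [← pv_mod10, hmod]; rfl)
        rw [hmod]
        have hcast : ((i : Int) + 1) = ((i + 1 : Nat) : Int) := by push_cast; ring
        rw [show (List.range i).map (pvS num) ++ [pvS num i] = (List.range (i+1)).map (pvS num) by
          rw [List.range_succ, List.map_append]; rfl, hcast]
        exact hrec
      · -- i = N: the scan finds the first earlier index J and A returns N - J
        have hiN2 : i = N := by omega
        subst hiN2
        have hsome := pv_idxOf_first (pvS num) (pvS num i) i J hJN hSJ hJfirst
        simp only [hinner, hsome, Option.map_some]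
        rw [if_pos h]
    · rw [dif_neg h]
      have : (i : Int) ≤ (N : Int) := by exact_mod_cast hiN
      rw [if_neg (by omega)]

-- ===== B-side: periodicity of the orbit =====
lemma pvS_add_period (num : Int) (N J : Nat) (hJN : J < N) (hSJ : pvS num J = pvS num N) :
    ∀ d : Nat, pvS num (J + d + (N - J)) = pvS num (J + d) := by
  intro d
  induction d with
  | zero =>
    have h : J + 0 + (N - J) = N := by omega
    rw [h]; simpa using hSJ.symm
  | succ d ih =>
    have h : J + (d + 1) + (N - J) = (J + d + (N - J)) + 1 := by omega
    rw [h]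
    show pvStep num (pvS num (J + d + (N - J))) = _
    rw [ih]; rfl

lemma pvS_ge_period (num : Int) (N J : Nat) (hJN : J < N) (hSJ : pvS num J = pvS num N)
    (i : Nat) (hi : J ≤ i) : pvS num (i + (N - J)) = pvS num i := by
  obtain ⟨d, rfl⟩ : ∃ d, i = J + d := ⟨i - J, by omega⟩
  exact pvS_add_period num N J hJN hSJ d

lemma pvS_add_mul_period (num : Int) (N J : Nat) (hJN : J < N) (hSJ : pvS num J = pvS num N) :
    ∀ (k i : Nat), J ≤ i → pvS num (i + k * (N - J)) = pvS num i := by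
  intro k
  induction k with
  | zero => intro i _; simp
  | succ k ih =>
    intro i hi
    have h : i + (k + 1) * (N - J) = (i + k * (N - J)) + (N - J) := by ring
    rw [h, pvS_ge_period num N J hJN hSJ _ (by omega), ih i hi]

lemma pvS_reduce (num : Int) (N J : Nat) (hJN : J < N) (hSJ : pvS num J = pvS num N)
    (i : Nat) (hi : J ≤ i) : pvS num i = pvS num (J + (i - J) % (N - J)) := by
  have h1 : (i - J) % (N - J) + (i - J) / (N - J) * (N - J) = i - J :=
    Nat.mod_add_div' (i - J) (N - J)
  have h2 : i = (J + (i - J) % (N - J)) + (i - J) / (N - J) * (N - J) := by omega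
  conv_lhs => rw [h2]
  exact pvS_add_mul_period num N J hJN hSJ _ _ (by omega)

-- meeting points of tortoise and hare: exactly the multiples of the period past the tail
lemma pv_meet_of (num : Int) (N J : Nat) (hJN : J < N) (hSJ : pvS num J = pvS num N)
    (t : Nat) (htJ : J ≤ t) (hdvd : (N - J) ∣ t) : pvS num t = pvS num (2 * t) := by
  obtain ⟨k, hk⟩ := hdvd
  have h : 2 * t = t + k * (N - J) := by rw [mul_comm k]; omega
  rw [h, pvS_add_mul_period num N J hJN hSJ k t htJ]

lemma pv_meet_ge (num : Int) (N J : Nat) (hJN : J < N) (hSJ : pvS num J = pvS num N)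
    (hinj : ∀ a b : Nat, a < b → b < N → pvS num a ≠ pvS num b)
    (t : Nat) (ht1 : 1 ≤ t) (hmeet : pvS num t = pvS num (2 * t)) : J ≤ t := by
  by_contra hlt
  rcases Nat.lt_or_ge (2 * t) N with h2N | h2N
  · exact hinj t (2 * t) (by omega) h2N hmeet
  · have hred := pvS_reduce num N J hJN hSJ (2 * t) (by omega)
    have hb : (2 * t - J) % (N - J) < N - J := Nat.mod_lt _ (by omega)
    exact hinj t (J + (2 * t - J) % (N - J)) (by omega) (by omega) (hmeet.trans hred)

lemma pv_meet_dvd (num : Int) (N J : Nat) (hJN : J < N) (hSJ : pvS num J = pvS num N)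
    (hinj : ∀ a b : Nat, a < b → b < N → pvS num a ≠ pvS num b)
    (t : Nat) (htJ : J ≤ t) (hmeet : pvS num t = pvS num (2 * t)) : (N - J) ∣ t := by
  have ha := pvS_reduce num N J hJN hSJ t htJ
  have hb := pvS_reduce num N J hJN hSJ (2 * t) (by omega)
  have hma : (t - J) % (N - J) < N - J := Nat.mod_lt _ (by omega)
  have hmb : (2 * t - J) % (N - J) < N - J := Nat.mod_lt _ (by omega)
  have heqidx : (t - J) % (N - J) = (2 * t - J) % (N - J) := by
    by_contra hne
    rcases Nat.lt_trichotomy ((t - J) % (N - J)) ((2 * t - J) % (N - J)) with h | h | h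
    · exact hinj _ _ (by omega) (by omega) ((ha.symm.trans (hmeet.trans hb)))
    · exact hne h
    · exact hinj _ _ (by omega) (by omega) ((hb.symm.trans (hmeet.symm.trans ha)))
  have hmod : (t - J) ≡ (2 * t - J) [MOD (N - J)] := heqidx
  have := (Nat.modEq_iff_dvd' (by omega : t - J ≤ 2 * t - J)).mp hmod
  have harg : 2 * t - J - (t - J) = t := by omega
  rwa [harg] at this

-- ===== B-side: the three fueled loops do what Floyd says =====
lemma pv_floyd1_run (num search_to : Int) (T : Nat) (_hT1 : 1 ≤ T)
    (hTmeet : pvS num T = pvS num (2 * T))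
    (hTmin : ∀ t, 1 ≤ t → pvS num t = pvS num (2 * t) → T ≤ t) :
    ∀ (f a : Nat), 1 ≤ a → a ≤ T → (a : Int) ≤ search_to → T - a < f →
      pvFloyd1 num search_to f (a : Int) (pvS num a) (pvS num (2 * a)) =
        if (T : Int) ≤ search_to then some (pvS num (2 * T)) else none := by
  intro f
  induction f with
  | zero => intro a _ _ _ h; omega
  | succ f ih =>
    intro a ha1 haT has hfa
    rw [pvFloyd1]
    by_cases hm : pvS num a = pvS num (2 * a)
    · rw [if_pos hm]
      have haT2 : a = T := le_antisymm haT (hTmin a ha1 hm)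
      rw [← haT2, ← hm, if_pos (by omega)]
    · rw [if_neg hm]
      have haT' : a < T := lt_of_le_of_ne haT (fun h => hm (h ▸ hTmeet))
      by_cases hcap : search_to ≤ (a : Int)
      · rw [if_pos hcap, if_neg (by omega)]
      · rw [if_neg hcap]
        have h1 : pvStep num (pvS num a) = pvS num (a + 1) := rfl
        have h2 : pvStep num (pvStep num (pvS num (2 * a))) = pvS num (2 * (a + 1)) := by
          have he : 2 * (a + 1) = 2 * a + 1 + 1 := by omega
          rw [he]; rfl
        have h3 : (a : Int) + 1 = ((a + 1 : Nat) : Int) := by push_cast; ring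
        rw [h1, h2, h3]
        exact ih (a + 1) (by omega) (by omega) (by omega) (by omega)

lemma pv_floyd2_run (num : Int) (J T : Nat)
    (hQ1 : ∀ m, m < J → pvS num m ≠ pvS num (T + m))
    (hQ2 : pvS num J = pvS num (T + J)) :
    ∀ (f m : Nat), m ≤ J → J - m < f →
      pvFloyd2 num f (pvS num m) (pvS num (T + m)) (m : Int) = ((J : Int), pvS num J) := by
  intro f
  induction f with
  | zero => intro m _ h; omega
  | succ f ih =>
    intro m hmJ hfm
    rw [pvFloyd2]
    by_cases hm : pvS num m = pvS num (T + m)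
    · rw [if_pos hm]
      have : m = J := by
        by_contra hne
        exact hQ1 m (by omega) hm
      rw [this]
    · rw [if_neg hm]
      have hmJ' : m < J := lt_of_le_of_ne hmJ (fun h => hm (h ▸ hQ2))
      have h1 : pvStep num (pvS num m) = pvS num (m + 1) := rfl
      have h2 : pvStep num (pvS num (T + m)) = pvS num (T + (m + 1)) := by
        have he : T + (m + 1) = T + m + 1 := by omega
        rw [he]; rfl
      have h3 : (m : Int) + 1 = ((m + 1 : Nat) : Int) := by push_cast; ring
      rw [h1, h2, h3]
      exact ih (m + 1) (by omega) (by omega)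

lemma pv_floyd3_run (num : Int) (J L : Nat) (_hL1 : 1 ≤ L)
    (hR1 : ∀ k, 1 ≤ k → k < L → pvS num (J + k) ≠ pvS num J)
    (hR2 : pvS num (J + L) = pvS num J) :
    ∀ (f k : Nat), 1 ≤ k → k ≤ L → L - k < f →
      pvFloyd3 num f (pvS num J) (pvS num (J + k)) (k : Int) = (L : Int) := by
  intro f
  induction f with
  | zero => intro k _ _ h; omega
  | succ f ih =>
    intro k hk1 hkL hfk
    rw [pvFloyd3]
    by_cases hm : pvS num J = pvS num (J + k)
    · rw [if_pos hm]
      have : k = L := by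
        by_contra hne
        exact hR1 k hk1 (by omega) hm.symm
      rw [this]
    · rw [if_neg hm]
      have hkL' : k < L := lt_of_le_of_ne hkL (fun h => hm (h ▸ hR2).symm)
      have h2 : pvStep num (pvS num (J + k)) = pvS num (J + (k + 1)) := by
        have he : J + (k + 1) = J + k + 1 := by omega
        rw [he]; rfl
      have h3 : (k : Int) + 1 = ((k + 1 : Nat) : Int) := by push_cast; ring
      rw [h2, h3]
      exact ih (k + 1) (by omega) (by omega) (by omega)

-- B returns the same "first repeat" answer as A's scan
lemma pv_B_char (num search_to : Int) (N J : Nat) (_hnum : num ≠ 0)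
    (hJN : J < N) (hSJ : pvS num J = pvS num N)
    (hinj : ∀ a b : Nat, a < b → b < N → pvS num a ≠ pvS num b)
    (hNle : N ≤ num.natAbs) (hpos : 0 < search_to) :
    dig_cyc_alt num search_to =
      if (N : Int) < search_to then (N : Int) - (J : Int) else search_to := by
  have hL1 : 1 ≤ N - J := by omega
  -- the canonical meeting point t₂ = (N-J) * (J/(N-J) + 1): past the tail, a multiple of the period, ≤ N
  have ht2eq : (N - J) * (J / (N - J) + 1) = J / (N - J) * (N - J) + (N - J) := by ring
  have ht2mod := Nat.mod_add_div' J (N - J)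
  have ht2lt : J % (N - J) < N - J := Nat.mod_lt _ (by omega)
  have ht2J : J < (N - J) * (J / (N - J) + 1) := by omega
  have ht2N : (N - J) * (J / (N - J) + 1) ≤ N := by omega
  have hmeet2 : pvS num ((N - J) * (J / (N - J) + 1)) = pvS num (2 * ((N - J) * (J / (N - J) + 1))) :=
    pv_meet_of num N J hJN hSJ _ (by omega) (Dvd.intro _ rfl)
  have hmeetex : ∃ t, 1 ≤ t ∧ pvS num t = pvS num (2 * t) := ⟨_, by omega, hmeet2⟩
  have hTspec : 1 ≤ Nat.find hmeetex ∧
      pvS num (Nat.find hmeetex) = pvS num (2 * Nat.find hmeetex) := Nat.find_spec hmeetex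
  have hTmin : ∀ t, 1 ≤ t → pvS num t = pvS num (2 * t) → Nat.find hmeetex ≤ t := fun t h1 h2 =>
    Nat.find_min' hmeetex ⟨h1, h2⟩
  have hTle : Nat.find hmeetex ≤ N := le_trans (hTmin _ (by omega) hmeet2) ht2N
  have hT1 := hTspec.1
  have hTmeet := hTspec.2
  have hTJ : J ≤ Nat.find hmeetex := pv_meet_ge num N J hJN hSJ hinj _ hT1 hTmeet
  have hTdvd : (N - J) ∣ Nat.find hmeetex := pv_meet_dvd num N J hJN hSJ hinj _ hTJ hTmeet
  have hQ2 : pvS num J = pvS num (Nat.find hmeetex + J) := by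
    obtain ⟨k, hk⟩ := hTdvd
    have h : Nat.find hmeetex + J = J + k * (N - J) := by rw [mul_comm k]; omega
    rw [h, pvS_add_mul_period num N J hJN hSJ k J le_rfl]
  have hQ1 : ∀ m, m < J → pvS num m ≠ pvS num (Nat.find hmeetex + m) := by
    intro m hm heq
    have hred := pvS_reduce num N J hJN hSJ (Nat.find hmeetex + m) (by omega)
    have hb : (Nat.find hmeetex + m - J) % (N - J) < N - J := Nat.mod_lt _ (by omega)
    exact hinj m (J + (Nat.find hmeetex + m - J) % (N - J)) (by omega) (by omega) (heq.trans hred)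
  have hR1 : ∀ k, 1 ≤ k → k < N - J → pvS num (J + k) ≠ pvS num J := by
    intro k h1 h2 heq
    exact hinj J (J + k) (by omega) (by omega) heq.symm
  have hR2 : pvS num (J + (N - J)) = pvS num J := by
    have h : J + (N - J) = N := by omega
    rw [h]; exact hSJ.symm
  -- now run the program
  rw [dig_cyc_alt, if_neg (by omega)]
  simp only [pvFloydMain]
  rw [show PySem.Int.mod 1 num = pvS num 0 from rfl,
      show pvStep num (pvS num 0) = pvS num 1 from rfl,
      show pvStep num (pvS num 1) = pvS num 2 from rfl]
  have hrun1 := pv_floyd1_run num search_to (Nat.find hmeetex) hT1 hTmeet hTmin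
    (num.natAbs + 1) 1 le_rfl hT1 (by omega) (by omega)
  rw [show (2 * 1 : Nat) = 2 from rfl, Nat.cast_one] at hrun1
  have hTN : ((Nat.find hmeetex : Nat) : Int) ≤ (N : Int) := by exact_mod_cast hTle
  by_cases hc : ((Nat.find hmeetex : Nat) : Int) ≤ search_to
  · rw [if_pos hc] at hrun1
    rw [hrun1]
    show pvFloydRest num search_to (pvS num (2 * Nat.find hmeetex)) = _
    simp only [pvFloydRest]
    rw [show PySem.Int.mod 1 num = pvS num 0 from rfl]
    rw [show pvS num (2 * Nat.find hmeetex) = pvS num (Nat.find hmeetex + 0) from by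
      rw [← hTmeet]; congr 1]
    have hrun2 := pv_floyd2_run num J (Nat.find hmeetex) hQ1 hQ2 (num.natAbs + 1) 0
      (by omega) (by omega)
    rw [Nat.cast_zero] at hrun2
    rw [hrun2]
    simp only
    rw [show pvStep num (pvS num J) = pvS num (J + 1) from rfl]
    have hrun3 := pv_floyd3_run num J (N - J) hL1 hR1 hR2 (num.natAbs + 1) 1 le_rfl hL1 (by omega)
    rw [Nat.cast_one] at hrun3
    rw [hrun3]
    split_ifs with h1 h2 <;> omega
  · rw [if_neg hc] at hrun1
    rw [hrun1]
    show search_to = _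
    rw [if_neg (by omega)]

-- ===== VERDICT (by name: the statement is the Claim_ definition above) =====
theorem dig_cyc_spec : Claim_equal_dig_cyc := by
  intro num search_to _hdom hpre
  unfold Spec_dig_cyc
  by_cases hst : search_to ≤ 0
  · rw [dig_cyc, digCycLoop, dif_neg (by omega), dig_cyc_alt, if_pos hst]
  · have hnum : num ≠ 0 := hpre.resolve_right hst
    obtain ⟨n0, hn0le, j0, hj0, heq0⟩ := pv_pigeon num hnum
    have hex : ∃ n, ∃ j, j < n ∧ pvS num j = pvS num n := ⟨n0, j0, hj0, heq0⟩
    have hNspec : ∃ j, j < Nat.find hex ∧ pvS num j = pvS num (Nat.find hex) :=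
      Nat.find_spec hex
    have hNle : Nat.find hex ≤ num.natAbs :=
      le_trans (Nat.find_min' hex ⟨j0, hj0, heq0⟩) hn0le
    have hinj : ∀ a b : Nat, a < b → b < Nat.find hex → pvS num a ≠ pvS num b := by
      intro a b hab hbN heq
      exact Nat.find_min hex hbN ⟨a, hab, heq⟩
    have hJspec : Nat.find hNspec < Nat.find hex ∧
        pvS num (Nat.find hNspec) = pvS num (Nat.find hex) := Nat.find_spec hNspec
    have hJfirst : ∀ j, j < Nat.find hNspec → pvS num j ≠ pvS num (Nat.find hex) := by
      intro j hjJ hjr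
      exact Nat.find_min hNspec hjJ ⟨lt_trans hjJ hJspec.1, hjr⟩
    have hA := pvA_loop num search_to (Nat.find hex) (Nat.find hNspec)
      hJspec.1 hJspec.2 hinj hJfirst search_to.toNat 0 1 (by simp) (by omega) rfl
    have hB := pv_B_char num search_to (Nat.find hex) (Nat.find hNspec) hnum
      hJspec.1 hJspec.2 hinj hNle (by omega)
    rw [dig_cyc]
    simp only [Nat.cast_zero, List.range_zero, List.map_nil] at hA
    exact hA.trans hB.symm
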